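-- pv_equiv track=rewrite | github.com/Ahnyezi/Algorithm | codingtest_final/3.py | solution
-- ===== SOURCE A (Python) =====
-- def solution(document):
--     d = list(document)
--     prev = '0'
--     i = 0
--     while i < len(d):
--         ch = d[i]
--         if (prev == '!' and ch == '?') or (prev =='!' and ch == '!') or (prev =='?' and ch == '?') :
--             i -= 1
--             d.pop(i)
--         elif (prev == '?' and ch == '!'):
--             d.pop(i)
--             i -= 1
--         prev = d[i] # prev 매시행마다 변화!
--         i+=1
--
--     return "".join(d)
-- ===== SOURCE B (Python) =====
-- def solution(document):
--     out = []
--     for ch in document: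
--         if out and out[-1] in "!?" and ch in "!?":
--             out[-1] = '!' if (out[-1] == '!' and ch == '!') else '?'
--         else:
--             out.append(ch)
--     return "".join(out)
-- ===== Notes on version B (the rewrite author's own statement) =====
-- stated objective: faster
-- what changed: Replaces A's in-place list surgery (pop at a moving index with index rewinds over a mutable copy of the string, quadratic from repeated pops) by a single left-to-right pass that keeps an output stack and merges each incoming special character with the stack top.
import Mathlib
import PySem

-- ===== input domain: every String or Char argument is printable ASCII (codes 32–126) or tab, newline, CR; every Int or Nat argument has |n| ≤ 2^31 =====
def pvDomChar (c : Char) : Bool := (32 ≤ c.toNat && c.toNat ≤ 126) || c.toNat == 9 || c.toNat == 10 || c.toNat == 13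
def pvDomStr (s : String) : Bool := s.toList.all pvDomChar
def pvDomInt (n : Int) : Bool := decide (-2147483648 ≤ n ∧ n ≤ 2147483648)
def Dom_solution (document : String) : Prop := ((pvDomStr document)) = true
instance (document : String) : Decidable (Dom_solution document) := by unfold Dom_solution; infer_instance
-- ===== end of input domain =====

-- B replaces A's in-place index loop (pop + index rewinds, O(n^2)) by a single left-to-right pass
-- keeping an output stack whose top is merged with the incoming special character (measured faster).

-- ===== PORT A =====
-- A's while loop: state is the mutable list d, prev and index i. Python's i is an int that
-- provably stays ≥ 0 here (the merge branches only fire when prev was read from d, i.e. i ≥ 1),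
-- so it is carried as a Nat; `d.getD i '0'` transcribes `d[i]`, whose index is always in range
-- at every read the loop performs. `d.pop(j)` is `List.eraseIdx d j`.
def solutionLoop (d : List Char) (prev : Char) (i : Nat) : List Char :=
  if h : i < d.length then
    let ch := d[i]
    if (prev = '!' ∧ ch = '?') ∨ (prev = '!' ∧ ch = '!') ∨ (prev = '?' ∧ ch = '?') then
      -- i -= 1 ; d.pop(i) ; prev = d[i] ; i += 1
      let i' := i - 1
      let d' := d.eraseIdx i'
      solutionLoop d' (d'.getD i' '0') (i' + 1)
    else if prev = '?' ∧ ch = '!' then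
      -- d.pop(i) ; i -= 1 ; prev = d[i] ; i += 1
      let d' := d.eraseIdx i
      let i' := i - 1
      solutionLoop d' (d'.getD i' '0') (i' + 1)
    else
      -- prev = d[i] ; i += 1
      solutionLoop d ch (i + 1)
  else d
termination_by 2 * d.length - i
decreasing_by
  · have := List.length_eraseIdx_of_lt (l := d) (i := i - 1) (by omega)
    omega
  · have := List.length_eraseIdx_of_lt (l := d) (i := i) h
    omega
  · omega

def solution (document : String) : String :=
  String.ofList (solutionLoop document.toList '0' 0)

-- ===== PORT B =====
-- B's step: the output stack is kept in REVERSED order, so Python's out[-1] is the head.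
def solutionAltStep (out : List Char) (ch : Char) : List Char :=
  match out with
  | [] => [ch]
  | t :: rest =>
    if (t = '!' ∨ t = '?') ∧ (ch = '!' ∨ ch = '?') then
      (if t = '!' ∧ ch = '!' then '!' else '?') :: rest
    else
      ch :: t :: rest

def solution_alt (document : String) : String :=
  String.ofList (List.foldl solutionAltStep [] document.toList).reverse

-- ===== PRECONDITION & SPEC =====
def Spec_solution (document : String) (out : String) : Prop := out = solution_alt document
instance (document : String) (out : String) : Decidable (Spec_solution document out) := by unfold Spec_solution; infer_instance

-- ===== CLAIM (what is proved, stated in full; the proofs are below) =====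
def Claim_equal_solution : Prop := ∀ (document : String), Dom_solution document → Spec_solution document (solution document)

-- ===== LEMMAS AND PROOFS =====

-- Invariant linking A's state (d, prev = d[i-1], i) with B's fold: the processed prefix of d,
-- reversed, is B's stack, and the loop processes the suffix. Strong induction on A's measure.
theorem solutionLoop_eq : ∀ (n : Nat) (d : List Char) (i : Nat),
    2 * d.length - i < n → 1 ≤ i → i ≤ d.length →
    solutionLoop d (d.getD (i - 1) '0') i
      = (List.foldl solutionAltStep (d.take i).reverse (d.drop i)).reverse := by
  intro n
  induction n with
  | zero => intro d i hm h1 h2; omega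
  | succ n ih =>
    intro d i hm h1 h2
    rw [solutionLoop]
    by_cases h : i < d.length
    · have hi1 : i - 1 < d.length := by omega
      have hprev : d.getD (i - 1) '0' = d[i - 1] := List.getD_eq_getElem d '0' hi1
      have htake : d.take i = d.take (i - 1) ++ [d[i - 1]] := by
        have h3 := List.take_succ_eq_append_getElem hi1
        rw [Nat.sub_add_cancel h1] at h3
        exact h3
      have hdrop : d.drop i = d[i] :: d.drop (i + 1) := List.drop_eq_getElem_cons h
      simp only [dif_pos h, hprev]
      by_cases hc1 : (d[i - 1] = '!' ∧ d[i] = '?') ∨ (d[i - 1] = '!' ∧ d[i] = '!') ∨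
          (d[i - 1] = '?' ∧ d[i] = '?')
      · -- merge branch 1: the previous character is removed, d[i] survives
        simp only [if_pos hc1]
        have herase : d.eraseIdx (i - 1) = d.take (i - 1) ++ d.drop i := by
          rw [List.eraseIdx_eq_take_drop_succ]
          congr 1
          congr 1
          omega
        have hlen : (d.eraseIdx (i - 1)).length = d.length - 1 :=
          List.length_eraseIdx_of_lt hi1
        have hcall := ih (d.eraseIdx (i - 1)) ((i - 1) + 1)
          (by omega) (by omega) (by omega)
        simp only [Nat.add_sub_cancel] at hcall
        rw [hcall]
        -- identify take/drop of the erased list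
        have hA : (d.take (i - 1)).length = i - 1 := by
          simp [List.length_take]; omega
        have htake' : (d.eraseIdx (i - 1)).take ((i - 1) + 1)
            = d.take (i - 1) ++ [d[i]] := by
          rw [herase, hdrop, List.take_append,
            List.take_of_length_le (by omega : (d.take (i - 1)).length ≤ (i - 1) + 1),
            show (i - 1) + 1 - (d.take (i - 1)).length = 1 by omega]
          simp only [List.take_succ_cons, List.take_zero]
        have hdrop' : (d.eraseIdx (i - 1)).drop ((i - 1) + 1) = d.drop (i + 1) := by
          rw [herase, hdrop, List.drop_append,
            List.drop_of_length_le (by omega : (d.take (i - 1)).length ≤ (i - 1) + 1),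
            show (i - 1) + 1 - (d.take (i - 1)).length = 1 by omega]
          simp
        rw [htake', hdrop', htake, hdrop]
        simp only [List.foldl_cons, List.reverse_append, List.reverse_cons,
          List.reverse_nil, List.nil_append, List.cons_append]
        congr 2
        -- the merged character equals d[i] in each of the three combinations
        rcases hc1 with ⟨ha, hb⟩ | ⟨ha, hb⟩ | ⟨ha, hb⟩ <;>
          simp [solutionAltStep, ha, hb]
      · by_cases hc2 : d[i - 1] = '?' ∧ d[i] = '!'
        · -- merge branch 2: d[i] is removed, the previous character survives
          simp only [if_neg hc1, if_pos hc2]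
          have herase : d.eraseIdx i = d.take i ++ d.drop (i + 1) :=
            List.eraseIdx_eq_take_drop_succ d i
          have hlen : (d.eraseIdx i).length = d.length - 1 :=
            List.length_eraseIdx_of_lt h
          have hcall := ih (d.eraseIdx i) ((i - 1) + 1)
            (by omega) (by omega) (by omega)
          simp only [Nat.add_sub_cancel] at hcall
          have hi : (i - 1) + 1 = i := by omega
          rw [hi] at hcall ⊢
          rw [hcall]
          have hA : (d.take i).length = i := by
            simp [List.length_take]; omega
          have htake' : (d.eraseIdx i).take i = d.take i := by
            rw [herase, List.take_append,
              List.take_of_length_le (by omega : (d.take i).length ≤ i),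
              show i - (d.take i).length = 0 by omega]
            simp
          have hdrop' : (d.eraseIdx i).drop i = d.drop (i + 1) := by
            rw [herase, List.drop_append,
              List.drop_of_length_le (by omega : (d.take i).length ≤ i),
              show i - (d.take i).length = 0 by omega]
            simp
          rw [htake', hdrop', htake, hdrop]
          simp only [List.foldl_cons, List.reverse_append, List.reverse_cons,
            List.reverse_nil, List.nil_append, List.cons_append]
          congr 2
          simp [solutionAltStep, hc2.1, hc2.2]
        · -- no merge: the characters are not both special
          simp only [if_neg hc1, if_neg hc2]
          have hcall := ih d (i + 1) (by omega) (by omega) (by omega)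
          simp only [Nat.add_sub_cancel] at hcall
          have hgd : d.getD i '0' = d[i] := List.getD_eq_getElem d '0' h
          rw [hgd] at hcall
          rw [hcall, List.take_succ_eq_append_getElem h, htake, hdrop]
          simp only [List.foldl_cons, List.reverse_append, List.reverse_cons,
            List.reverse_nil, List.nil_append, List.cons_append]
          congr 2
          have hns : ¬((d[i - 1] = '!' ∨ d[i - 1] = '?') ∧ (d[i] = '!' ∨ d[i] = '?')) := by
            rintro ⟨ha | ha, hb | hb⟩ <;> simp [ha, hb] at hc1 hc2
          simp [solutionAltStep, hns]
    · have hlen : i = d.length := by omega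
      simp only [dif_neg h]
      rw [hlen]
      simp

theorem solution_spec_aux (l : List Char) :
    solutionLoop l '0' 0 = (List.foldl solutionAltStep [] l).reverse := by
  cases l with
  | nil => rw [solutionLoop]; simp
  | cons c t =>
    rw [solutionLoop]
    have h : 0 < (c :: t).length := by simp
    simp only [dif_pos h]
    have h0 : ('0' : Char) ≠ '!' ∧ ('0' : Char) ≠ '?' := by decide
    simp only [List.getElem_cons_zero]
    have hn1 : ¬(('0' : Char) = '!' ∧ c = '?' ∨ ('0' : Char) = '!' ∧ c = '!' ∨
        ('0' : Char) = '?' ∧ c = '?') := by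
      rintro (⟨ha, _⟩ | ⟨ha, _⟩ | ⟨ha, _⟩) <;> exact absurd ha (by decide)
    have hn2 : ¬(('0' : Char) = '?' ∧ c = '!') := by
      rintro ⟨ha, _⟩; exact absurd ha (by decide)
    rw [if_neg hn1, if_neg hn2]
    have hcall := solutionLoop_eq (2 * (c :: t).length) (c :: t) 1
      (by simp only [List.length_cons]; omega) (by omega)
      (by simp only [List.length_cons]; omega)
    simp only [Nat.sub_self] at hcall
    have hgd : (c :: t).getD 0 '0' = c := rfl
    rw [hgd] at hcall
    rw [hcall]
    simp [solutionAltStep]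

-- ===== VERDICT (by name: the statement is the Claim_ definition above) =====
theorem solution_spec : Claim_equal_solution := by
  intro document _
  unfold Spec_solution solution solution_alt
  rw [solution_spec_aux]
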